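-- pv_equiv track=rewrite | github.com/simonwmatthews/pyDEW | pyQ3/system.py | _d0_solid_solution
-- ===== SOURCE A (Python) =====
-- def _d0_solid_solution(ss,s=''):
--     ss_name = ss[0]
--     ss_endmembers = ss[1]
--     s += ss_name + (24-len(ss_name))*' '+str(len(ss_endmembers))+'    0\n'
--     for i in range(len(ss_endmembers)):
--         if i%2 == 0:
--             s += '       1.000 ' + ss_endmembers[i] + (22-len(ss_endmembers[i]))*' '
--         else:
--             s += '1.000 ' + ss_endmembers[i] + '\n'
--     if len(ss_endmembers)%2 == 1:
--         s += '\n'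
--     s += '\n'
--     s += '    0.0000    0.0000    0.0000    0.0000    0.0000    0.0000\n'*2
--     s += '+----------------------------------------------------------------------\n'
--     return s
-- ===== SOURCE B (Python) =====
-- def _pair_lines(ems):
--     if len(ems) == 0:
--         return []
--     if len(ems) == 1:
--         return ['       1.000 ' + ems[0] + (22 - len(ems[0])) * ' ']
--     first = '       1.000 ' + ems[0] + (22 - len(ems[0])) * ' ' + '1.000 ' + ems[1]
--     return [first] + _pair_lines(ems[2:])
--
--
-- def _d0_solid_solution(ss, s=''):
--     name, ems = ss[0], ss[1]
--     lines = [name + (24 - len(name)) * ' ' + str(len(ems)) + '    0']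
--     lines += _pair_lines(ems)
--     lines.append('')
--     lines += ['    0.0000    0.0000    0.0000    0.0000    0.0000    0.0000'] * 2
--     lines.append('+----------------------------------------------------------------------')
--     return s + '\n'.join(lines) + '\n'
-- ===== Notes on version B (the rewrite author's own statement) =====
-- stated objective: idiomatic
-- what changed: Replaces the flat index loop with an i%2 parity branch and incremental string += by building one output line per endmember pair (recursively, two elements at a time) and assembling everything with a single '\n'.join.
import Mathlib
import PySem

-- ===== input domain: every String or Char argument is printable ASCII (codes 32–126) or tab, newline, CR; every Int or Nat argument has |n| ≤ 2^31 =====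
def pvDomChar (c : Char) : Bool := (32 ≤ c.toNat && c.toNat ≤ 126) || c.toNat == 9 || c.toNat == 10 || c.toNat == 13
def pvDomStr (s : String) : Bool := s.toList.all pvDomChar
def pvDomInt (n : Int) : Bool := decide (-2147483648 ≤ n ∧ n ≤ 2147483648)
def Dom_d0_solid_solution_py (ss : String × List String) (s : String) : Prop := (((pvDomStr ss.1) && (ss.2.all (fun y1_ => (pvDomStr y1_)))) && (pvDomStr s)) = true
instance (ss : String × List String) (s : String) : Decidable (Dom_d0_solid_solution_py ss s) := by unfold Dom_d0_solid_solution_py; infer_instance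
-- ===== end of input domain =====

-- B replaces A's flat index loop (parity branch, incremental +=) by a pair-grouped
-- line list assembled with one '\n'.join — idiomatic decomposition, same output.

-- shared primitive: Python's  n*' '  (empty for n ≤ 0); char-list level
def pvSpaces (n : Int) : List Char := List.replicate n.toNat ' '
-- shared primitive: Python's  t*n  on strings
def pvRepeat (t : List Char) (n : Int) : List Char := (List.replicate n.toNat t).flatten

-- ===== PORT A =====
-- loop body of A's 'for i in range(len(ss_endmembers))'
def pvBodyA (ems : List (List Char)) (cs : List Char) (i : Int) : List Char :=
  if PySem.Int.mod i 2 == 0 then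
    cs ++ "       1.000 ".toList ++ PySem.List.pyGetD ems i []
       ++ pvSpaces (22 - PySem.Chars.len (PySem.List.pyGetD ems i []))
  else
    cs ++ "1.000 ".toList ++ PySem.List.pyGetD ems i [] ++ "\n".toList

def d0_solid_solution_py (ss : String × List String) (s : String) : String :=
  let ss_name := ss.1.toList
  let ems := ss.2.map String.toList
  let cs := s.toList ++ ss_name ++ pvSpaces (24 - PySem.Chars.len ss_name)
              ++ PySem.Int.toChars (PySem.List.len ems) ++ "    0\n".toList
  let cs := (PySem.List.pyRange 0 (PySem.List.len ems)).foldl (pvBodyA ems) cs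
  let cs := if PySem.Int.mod (PySem.List.len ems) 2 == 1 then cs ++ "\n".toList else cs
  let cs := cs ++ "\n".toList
  let cs := cs ++ pvRepeat "    0.0000    0.0000    0.0000    0.0000    0.0000    0.0000\n".toList 2
  let cs := cs ++ "+----------------------------------------------------------------------\n".toList
  String.ofList cs

-- ===== PORT B =====
-- B's _pair_lines: one line per pair of endmembers, recursing on ems[2:]
def pvPairLines : List (List Char) → List (List Char)
  | [] => []
  | [a] => ["       1.000 ".toList ++ a ++ pvSpaces (22 - PySem.Chars.len a)]
  | a :: b :: rest =>
      ("       1.000 ".toList ++ a ++ pvSpaces (22 - PySem.Chars.len a)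
        ++ "1.000 ".toList ++ b) :: pvPairLines rest

def d0_solid_solution_py_alt (ss : String × List String) (s : String) : String :=
  let name := ss.1.toList
  let ems := ss.2.map String.toList
  let lines := [name ++ pvSpaces (24 - PySem.Chars.len name)
                  ++ PySem.Int.toChars (PySem.List.len ems) ++ "    0".toList]
    ++ pvPairLines ems
    ++ [[]]
    ++ List.replicate 2 "    0.0000    0.0000    0.0000    0.0000    0.0000    0.0000".toList
    ++ ["+----------------------------------------------------------------------".toList]
  String.ofList (s.toList ++ PySem.Chars.join "\n".toList lines ++ "\n".toList)

-- ===== PRECONDITION & SPEC =====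
def Spec_d0_solid_solution_py (ss : String × List String) (s : String) (out : String) : Prop := out = d0_solid_solution_py_alt ss s
instance (ss : String × List String) (s : String) (out : String) : Decidable (Spec_d0_solid_solution_py ss s out) := by unfold Spec_d0_solid_solution_py; infer_instance

-- ===== CLAIM (what is proved, stated in full; the proofs are below) =====
def Claim_equal_d0_solid_solution_py : Prop := ∀ (ss : String × List String) (s : String), Dom_d0_solid_solution_py ss s → Spec_d0_solid_solution_py ss s (d0_solid_solution_py ss s)

-- ===== LEMMAS AND PROOFS =====

-- concatenation of lines, each terminated by '\n'
def pvCat (ls : List (List Char)) : List Char := ls.foldr (fun l r => l ++ "\n".toList ++ r) []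

lemma pvCat_cons (x : List Char) (l : List (List Char)) :
    pvCat (x :: l) = x ++ "\n".toList ++ pvCat l := rfl

-- B's '\n'.join over header, pair lines and the fixed tail, as explicit concatenation
lemma pv_join_tail (h z f : List Char) (pl : List (List Char)) :
    PySem.Chars.join "\n".toList (h :: (pl ++ [] :: z :: z :: f :: List.nil))
      = h ++ "\n".toList ++ (pvCat pl ++ "\n".toList ++ z ++ "\n".toList ++ z ++ "\n".toList ++ f) := by
  induction pl generalizing h with
  | nil =>
      simp [PySem.Chars.join_cons_cons, PySem.Chars.join_singleton, pvCat, List.append_assoc]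
  | cons x t ih =>
      rw [List.cons_append, PySem.Chars.join_cons_cons, ih x]
      simp [pvCat_cons, List.append_assoc]

lemma pv_mod_natCast (n : Nat) : PySem.Int.mod (n : Int) 2 = ((n % 2 : Nat) : Int) := by
  simp [PySem.Int.mod, Int.fmod_eq_emod]

-- A's loop (in List.range form) followed by the odd-count '\n' equals B's pair lines
lemma pv_loopA (ems : List (List Char)) (acc : List Char) :
    (List.range ems.length).foldl (fun (cs : List Char) (k : Nat) => pvBodyA ems cs ((0 : Int) + (k : Int))) acc
        ++ (if ems.length % 2 == 1 then "\n".toList else [])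
      = acc ++ pvCat (pvPairLines ems) := by
  induction ems using pvPairLines.induct generalizing acc with
  | case1 => simp [pvCat, pvPairLines]
  | case2 a =>
      simp [pvPairLines, pvCat, List.range_succ, pvBodyA,
            PySem.List.pyGetD_natCast]
  | case3 a b rest ih =>
      have hlen : (a :: b :: rest).length = 2 + rest.length := by simp; omega
      rw [hlen, List.range_add, List.foldl_append]
      have h2 : List.range 2 = [0, 1] := rfl
      have hfun : (fun (cs : List Char) (k : Nat) => pvBodyA (a :: b :: rest) cs ((0 : Int) + ((2 + k : Nat) : Int)))
          = fun (cs : List Char) (k : Nat) => pvBodyA rest cs ((0 : Int) + (k : Int)) := by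
        funext cs k
        have hmod : PySem.Int.mod ((0 : Int) + ((2 + k : Nat) : Int)) 2
            = PySem.Int.mod ((0 : Int) + (k : Int)) 2 := by
          rw [zero_add, zero_add, pv_mod_natCast, pv_mod_natCast]
          omega
        have hget : PySem.List.pyGetD (a :: b :: rest) ((0 : Int) + ((2 + k : Nat) : Int)) ([] : List Char)
            = PySem.List.pyGetD rest ((0 : Int) + (k : Int)) ([] : List Char) := by
          rw [zero_add, zero_add, PySem.List.pyGetD_natCast, PySem.List.pyGetD_natCast]
          simp [Nat.add_comm 2 k, List.getD]
        simp only [pvBodyA, hmod, hget]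
      rw [List.foldl_map, hfun, h2]
      have hm : (2 + rest.length) % 2 = rest.length % 2 := by omega
      rw [hm, ih]
      simp only [List.foldl_cons, List.foldl_nil, pvPairLines, pvCat, List.foldr_cons]
      have g0 : PySem.List.pyGetD (a :: b :: rest) (0 : Int) ([] : List Char) = a := by
        simpa using PySem.List.pyGetD_natCast (a :: b :: rest) 0 ([] : List Char)
      have g1 : PySem.List.pyGetD (a :: b :: rest) (1 : Int) ([] : List Char) = b := by
        simpa using PySem.List.pyGetD_natCast (a :: b :: rest) 1 ([] : List Char)
      simp [pvBodyA, g0, g1, List.append_assoc]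

lemma pv_ite_append (c : Bool) (cs t : List Char) :
    (if c then cs ++ t else cs) = cs ++ (if c then t else []) := by
  cases c <;> simp

set_option maxRecDepth 8192 in
lemma pv_main (ss : String × List String) (s : String) :
    d0_solid_solution_py ss s = d0_solid_solution_py_alt ss s := by
  unfold d0_solid_solution_py d0_solid_solution_py_alt
  dsimp only
  refine congrArg String.ofList ?_
  rw [PySem.List.pyRange_one]
  simp only [PySem.List.len_eq, Int.sub_zero, Int.toNat_natCast]
  rw [List.foldl_map]
  rw [pv_ite_append]
  have hcond : ∀ l : Nat, ((PySem.Int.mod (l : Int) 2 == 1) = (l % 2 == 1)) := by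
    intro l
    rw [pv_mod_natCast]
    cases h : l % 2 == 1 <;> simp_all
  rw [hcond]
  rw [pv_loopA]
  simp only [List.replicate, List.cons_append, List.nil_append,
    List.append_assoc]
  rw [pv_join_tail]
  simp [pvRepeat, List.append_assoc]

-- ===== VERDICT (by name: the statement is the Claim_ definition above) =====
theorem d0_solid_solution_py_spec : Claim_equal_d0_solid_solution_py := by
  intro ss s _
  unfold Spec_d0_solid_solution_py
  exact pv_main ss s
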